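-- pv_equiv track=rewrite | github.com/Prathamesh282/Sachbol-AI | render_app/backend/agent.py | _is_usable_image
-- ===== SOURCE A (Python) =====
-- _BAD_IMAGE_PATTERNS = (
--     "news.google.com",
--     "google.com/s2",
--     "placehold.co",
--     "placeholder",
--     "1x1",
--     "pixel",
--     "/logo",
--     "logo.",
--     "icon.",
--     "favicon",
-- )
--
-- def _is_usable_image(url: str | None) -> bool:
--     """Return True only if the URL looks like a real article image."""
--     if not url:
--         return False
--     url_lower = url.lower()
--     for bad in _BAD_IMAGE_PATTERNS:
--         if bad in url_lower:
--             return False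
--     return True
-- ===== SOURCE B (Python) =====
-- _BAD_IMAGE_PATTERNS = (
--     "news.google.com",
--     "google.com/s2",
--     "placehold.co",
--     "placeholder",
--     "1x1",
--     "pixel",
--     "/logo",
--     "logo.",
--     "icon.",
--     "favicon",
-- )
--
-- def _is_usable_image(url):
--     """Single left-to-right scan: at each position check whether any bad
--     pattern starts there, instead of one substring search per pattern."""
--     if not url:
--         return False
--     u = url.lower()
--     for i in range(len(u)):
--         for p in _BAD_IMAGE_PATTERNS:
--             if u.startswith(p, i):
--                 return False
--     return True
-- ===== Notes on version B (the rewrite author's own statement) =====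
-- stated objective: alternative
-- what changed: B makes one position-major scan over the lowercased URL, testing at each index whether any bad pattern starts there, instead of A's pattern-major loop of ten independent substring searches.
import Mathlib
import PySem

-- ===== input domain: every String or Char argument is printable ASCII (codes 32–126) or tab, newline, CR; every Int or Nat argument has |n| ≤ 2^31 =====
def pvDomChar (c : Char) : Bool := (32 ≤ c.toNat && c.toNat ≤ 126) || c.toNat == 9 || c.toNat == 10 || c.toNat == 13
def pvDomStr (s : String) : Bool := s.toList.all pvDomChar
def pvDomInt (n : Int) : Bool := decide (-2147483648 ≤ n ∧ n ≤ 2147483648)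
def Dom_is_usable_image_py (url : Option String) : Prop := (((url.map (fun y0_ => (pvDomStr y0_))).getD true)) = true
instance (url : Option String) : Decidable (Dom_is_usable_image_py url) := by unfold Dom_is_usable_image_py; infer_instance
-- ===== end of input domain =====

-- B replaces A's pattern-major loop of ten substring searches by one position-major
-- scan of the lowercased URL, checking at each index whether a bad pattern starts there
-- (objective: alternative; same result proved for all inputs).

-- ===== PORT A =====
def pvBadImagePatterns : List String :=
  ["news.google.com", "google.com/s2", "placehold.co", "placeholder",
   "1x1", "pixel", "/logo", "logo.", "icon.", "favicon"]

-- A's 'for bad in _BAD_IMAGE_PATTERNS: if bad in url_lower: return False'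
def pvCheckPats : List String → String → Bool
  | [], _ => true
  | p :: ps, u => if PySem.Str.isIn p u then false else pvCheckPats ps u

def is_usable_image_py (url : Option String) : Bool :=
  match url with
  | none => false
  | some s => if s = "" then false else pvCheckPats pvBadImagePatterns (PySem.Str.lower s)

-- ===== PORT B =====
def pvBadImagePatternsL : List (List Char) := pvBadImagePatterns.map String.toList

-- B's inner loop: 'for p in _BAD_IMAGE_PATTERNS: if u.startswith(p, i): return False'
def pvBadAt : List (List Char) → List Char → Bool
  | [], _ => false
  | p :: ps, cs => if PySem.Chars.startswith cs p then true else pvBadAt ps cs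

-- B's outer loop over the positions i of u, as recursion over the suffixes of u
def pvScan : List Char → Bool
  | [] => true
  | c :: rest => if pvBadAt pvBadImagePatternsL (c :: rest) then false else pvScan rest

def is_usable_image_py_alt (url : Option String) : Bool :=
  match url with
  | none => false
  | some s => if s = "" then false else pvScan (PySem.Chars.lower s.toList)

-- ===== PRECONDITION & SPEC =====
def Spec_is_usable_image_py (url : Option String) (out : Bool) : Prop := out = is_usable_image_py_alt url
instance (url : Option String) (out : Bool) : Decidable (Spec_is_usable_image_py url out) := by unfold Spec_is_usable_image_py; infer_instance

-- ===== CLAIM (what is proved, stated in full; the proofs are below) =====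
def Claim_equal_is_usable_image_py : Prop := ∀ (url : Option String), Dom_is_usable_image_py url → Spec_is_usable_image_py url (is_usable_image_py url)

-- ===== LEMMAS AND PROOFS =====

lemma pvBadAt_iff (ps : List (List Char)) (cs : List Char) :
    pvBadAt ps cs = true ↔ ∃ p ∈ ps, p <+: cs := by
  induction ps with
  | nil => simp [pvBadAt]
  | cons p ps ih =>
    simp only [pvBadAt]
    by_cases h : p <+: cs
    · rw [if_pos ((PySem.Chars.startswith_iff cs p).mpr h)]
      simp [h]
    · rw [if_neg (by rw [PySem.Chars.startswith_iff]; exact h)]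
      simp [h, ih]

lemma pvBadImagePatternsL_ne_nil : ∀ p ∈ pvBadImagePatternsL, p ≠ [] := by decide

lemma pvScan_iff (cs : List Char) :
    pvScan cs = true ↔ ∀ p ∈ pvBadImagePatternsL, ¬ p <:+: cs := by
  induction cs with
  | nil =>
    simp only [pvScan, true_iff]
    intro p hp hinf
    exact pvBadImagePatternsL_ne_nil p hp (List.eq_nil_of_infix_nil hinf)
  | cons c rest ih =>
    simp only [pvScan]
    by_cases h : pvBadAt pvBadImagePatternsL (c :: rest) = true
    · obtain ⟨p, hp, hpre⟩ := (pvBadAt_iff _ _).mp h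
      rw [if_pos h]
      simp only [Bool.false_eq_true, false_iff, not_forall]
      exact ⟨p, hp, by simp [hpre.isInfix]⟩
    · rw [if_neg h, ih]
      constructor
      · intro hall p hp hinf
        rcases List.infix_cons_iff.mp hinf with hpre | hinf'
        · exact h ((pvBadAt_iff _ _).mpr ⟨p, hp, hpre⟩)
        · exact hall p hp hinf'
      · intro hall p hp hinf
        exact hall p hp (List.infix_cons_iff.mpr (Or.inr hinf))

lemma pvCheckPats_iff (ps : List String) (u : String) :
    pvCheckPats ps u = true ↔ ∀ p ∈ ps, ¬ p.toList <:+: u.toList := by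
  induction ps with
  | nil => simp [pvCheckPats]
  | cons p ps ih =>
    simp only [pvCheckPats]
    by_cases h : p.toList <:+: u.toList
    · rw [if_pos ((PySem.Str.isIn_iff_infix p u).mpr h)]
      simp [h]
    · rw [if_neg (by rw [PySem.Str.isIn_iff_infix]; exact h)]
      simp [h, ih]

-- ===== VERDICT (by name: the statement is the Claim_ definition above) =====
theorem is_usable_image_py_spec : Claim_equal_is_usable_image_py := by
  intro url _
  unfold Spec_is_usable_image_py is_usable_image_py is_usable_image_py_alt
  match url with
  | none => rfl
  | some s =>
    by_cases hs : s = ""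
    · simp [hs]
    · simp only [hs, if_false]
      rw [Bool.eq_iff_iff, pvCheckPats_iff, pvScan_iff]
      have hl : (PySem.Str.lower s).toList = PySem.Chars.lower s.toList := by
        simp [PySem.Str.toList_lower]
      constructor
      · intro hall q hq
        simp only [pvBadImagePatternsL, List.mem_map] at hq
        obtain ⟨p, hp, rfl⟩ := hq
        rw [← hl]; exact hall p hp
      · intro hall p hp
        rw [hl]
        exact hall p.toList (by simp [pvBadImagePatternsL]; exact ⟨p, hp, rfl⟩)
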